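-- pv_equiv track=rewrite | github.com/themuffinator/PakFu | scripts/update_changelog.py | insert_entry
-- ===== SOURCE A (Python) =====
-- def insert_entry(lines: list[str], entry: list[str]) -> list[str]:
--     for line in lines:
--         if line.startswith(entry[0]):
--             return lines
--     insert_at = len(lines)
--     for idx, line in enumerate(lines):
--         if line.startswith("## ["):
--             insert_at = idx
--             break
--     return lines[:insert_at] + entry + [""] + lines[insert_at:]
-- ===== SOURCE B (Python) =====
-- def insert_entry(lines: list[str], entry: list[str]) -> list[str]:
--     if any(line.startswith(entry[0]) for line in lines):
--         return lines
--     return _splice(lines, entry)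
--
--
-- def _splice(lines: list[str], entry: list[str]) -> list[str]:
--     # rebuild the result by consuming an iterator: copy lines until the first
--     # version header, then emit the entry, a blank line, and the remainder
--     out = []
--     it = iter(lines)
--     for line in it:
--         if line.startswith("## ["):
--             return out + entry + [""] + [line] + list(it)
--         out.append(line)
--     return out + entry + [""]
-- ===== Notes on version B (the rewrite author's own statement) =====
-- stated objective: alternative
-- what changed: Replaces A's index-finding loop plus slice-and-concatenate splice with an any() duplicate test and an iterator-consuming pass that rebuilds the list via an accumulator, emitting the entry at the first '## [' header (or the end) with no indices or slicing.
-- outside the precondition, e.g. on insert_entry([], []): A returns [''], B returns ['']; on insert_entry(['x'], []): A raises IndexError, B raises IndexError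
import Mathlib
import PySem

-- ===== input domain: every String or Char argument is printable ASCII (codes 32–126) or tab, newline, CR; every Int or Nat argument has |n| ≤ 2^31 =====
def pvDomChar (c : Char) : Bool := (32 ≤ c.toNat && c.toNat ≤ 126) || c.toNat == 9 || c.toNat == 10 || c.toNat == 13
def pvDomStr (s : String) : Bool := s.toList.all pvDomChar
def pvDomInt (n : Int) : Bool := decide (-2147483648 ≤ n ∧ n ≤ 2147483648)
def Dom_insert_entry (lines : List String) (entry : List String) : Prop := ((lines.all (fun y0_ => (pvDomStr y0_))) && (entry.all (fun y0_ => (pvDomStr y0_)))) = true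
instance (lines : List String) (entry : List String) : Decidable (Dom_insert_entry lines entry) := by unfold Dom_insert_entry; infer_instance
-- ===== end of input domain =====

-- ===== PORT A =====
-- B replaces A's index search + slicing splice by a recursive splice; return values proved equal (no side effects).

-- A's second loop: first index whose line startswith "## [", defaulting to len(lines)
def aInsertAt (lines : List String) : Nat :=
  match lines with
  | [] => 0
  | l :: ls => if PySem.Str.startswith l "## [" then 0 else 1 + aInsertAt ls

-- Python's entry[0] raises IndexError on empty entry (excluded by Pre_); headD "" stands in there.
-- insert_at is always in [0, len lines], so lines[:k] / lines[k:] are exactly take / drop.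
def insert_entry (lines : List String) (entry : List String) : List String :=
  let p := entry.headD ""
  if lines.any (fun line => PySem.Str.startswith line p) then lines
  else
    let insert_at := aInsertAt lines
    lines.take insert_at ++ entry ++ [""] ++ lines.drop insert_at

-- ===== PORT B =====
-- Source B's _splice: consume the lines, accumulating out until the first header (or the end)
def bSplice (out : List String) (lines : List String) (entry : List String) : List String :=
  match lines with
  | [] => out ++ entry ++ [""]
  | l :: ls =>
      if PySem.Str.startswith l "## [" then out ++ entry ++ [""] ++ [l] ++ ls
      else bSplice (out ++ [l]) ls entry

def insert_entry_alt (lines : List String) (entry : List String) : List String :=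
  if lines.any (fun line => PySem.Str.startswith line (entry.headD "")) then lines
  else bSplice [] lines entry

-- ===== PRECONDITION & SPEC =====
-- Pre_ excludes empty entry: there A's entry[0] raises IndexError whenever lines is non-empty, and on empty lines the [''] both happen to return is an accident of skipping the duplicate test entirely.
def Pre_insert_entry (lines : List String) (entry : List String) : Prop := entry ≠ []
instance (lines : List String) (entry : List String) : Decidable (Pre_insert_entry lines entry) := by unfold Pre_insert_entry; infer_instance
def pvWitness_insert_entry : List String × List String := (["# Changelog", "## [1.0]"], ["## [1.1]", "- fix"])

def Spec_insert_entry (lines : List String) (entry : List String) (out : List String) : Prop := out = insert_entry_alt lines entry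
instance (lines : List String) (entry : List String) (out : List String) : Decidable (Spec_insert_entry lines entry out) := by unfold Spec_insert_entry; infer_instance

-- ===== CLAIM (what is proved, stated in full; the proofs are below) =====
def Claim_equal_insert_entry : Prop := ∀ (lines : List String) (entry : List String), Dom_insert_entry lines entry → Pre_insert_entry lines entry → Spec_insert_entry lines entry (insert_entry lines entry)

-- ===== LEMMAS AND PROOFS =====

theorem splice_eq (lines : List String) (out entry : List String) :
    out ++ lines.take (aInsertAt lines) ++ entry ++ [""] ++ lines.drop (aInsertAt lines)
      = bSplice out lines entry := by
  induction lines generalizing out with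
  | nil => simp [aInsertAt, bSplice]
  | cons l ls ih =>
      simp only [aInsertAt, bSplice]
      cases h : PySem.Str.startswith l "## [" with
      | true => simp
      | false =>
          simp only [Bool.false_eq_true, if_false, Nat.add_comm 1, List.take_succ_cons,
            List.drop_succ_cons]
          rw [← ih]
          simp

-- ===== VERDICT (by name: the statement is the Claim_ definition above) =====
theorem insert_entry_spec : Claim_equal_insert_entry := by
  intro lines entry _ _
  unfold Spec_insert_entry insert_entry insert_entry_alt
  by_cases hD : lines.any (fun line => PySem.Str.startswith line (entry.headD "")) = true
  · rw [if_pos hD, if_pos hD]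
  · rw [if_neg hD, if_neg hD]
    simpa using splice_eq lines [] entry
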